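-- pv_equiv track=rewrite | github.com/mkratz/audio-anything | src/audio_anything/clean.py | _merge_chunk_boundaries
-- ===== SOURCE A (Python) =====
-- def _merge_chunk_boundaries(parts: list[str]) -> str:
--     """Join cleaned chunks, merging sentences split across chunk boundaries."""
--     if not parts:
--         return ""
--
--     merged = parts[0]
--     for part in parts[1:]:
--         # Check if previous chunk ends mid-sentence
--         # Look past any trailing image descriptions
--         prev_stripped = merged.rstrip()
--         if not prev_stripped:
--             merged += "\n\n" + part
--             continue
--
--         # Find last body line (skip trailing image descriptions)
--         prev_lines = prev_stripped.split("\n")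
--         body_end = prev_stripped
--         for line in reversed(prev_lines):
--             line_s = line.strip()
--             if line_s and not line_s.startswith("Image description:"):
--                 body_end = line_s
--                 break
--
--         last_char = body_end[-1] if body_end else ""
--         ends_mid_sentence = last_char not in ".!?\"'\u201d"
--
--         # Check if next chunk starts with lowercase or continuation
--         next_stripped = part.lstrip()
--         first_char = next_stripped[0] if next_stripped else ""
--         starts_continuation = next_stripped and (
--             first_char.islower()
--             or first_char == "("
--             or next_stripped.startswith("and ")
--             or next_stripped.startswith("or ")
--             or next_stripped.startswith("but ")
--         )
--
--         if ends_mid_sentence and starts_continuation: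
--             # Merge directly — the sentence was split at the boundary
--             merged = prev_stripped + " " + next_stripped
--         else:
--             merged += "\n\n" + part
--
--     return merged
-- ===== SOURCE B (Python) =====
-- _ENDERS = ".!?\"'\u201d"
-- _IMG = "Image description:"
--
--
-- def _merge_chunk_boundaries(parts: list[str]) -> str:
--     """Join cleaned chunks, merging sentences split across chunk boundaries.
--
--     Single pass: the chunks are collected in a list (joined once at the end),
--     while two pieces of state summarise the text so far -- its last line and
--     the closing character of the most recent complete body line -- so the
--     accumulated text is never rescanned.
--     """
--     if not parts:
--         return ""
--
--     def is_body(line):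
--         return bool(line) and not line.startswith(_IMG)
--
--     pieces = [parts[0]]
--     tail = None        # last line of the text so far (whitespace stripped), or None
--     body_char = None   # last char of the most recent complete body line, or None
--
--     def scan(lines):
--         """Fold completed lines into body_char; the last one becomes the new tail."""
--         nonlocal tail, body_char
--         for line in lines[:-1]:
--             s = line.strip()
--             if is_body(s):
--                 body_char = s[-1]
--         tail = lines[-1].lstrip()
--
--     def absorb(text):
--         """Account for text appended at a fresh line boundary."""
--         nonlocal body_char
--         q = text.rstrip()
--         if not q:
--             return
--         if tail is not None and is_body(tail):
--             body_char = tail[-1]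
--         scan(q.split("\n"))
--
--     absorb(parts[0])
--
--     for part in parts[1:]:
--         if tail is None:
--             pieces.append("\n\n" + part)
--             absorb(part)
--             continue
--
--         last = tail[-1] if is_body(tail) or body_char is None else body_char
--         ends_mid_sentence = last not in _ENDERS
--
--         ns = part.lstrip()
--         starts_continuation = bool(ns) and (
--             ns[0].islower()
--             or ns[0] == "("
--             or ns.startswith(("and ", "or ", "but "))
--         )
--
--         if ends_mid_sentence and starts_continuation:
--             while not pieces[-1].rstrip():
--                 pieces.pop()
--             pieces[-1] = pieces[-1].rstrip()
--             pieces.append(" " + ns)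
--             qlines = ns.rstrip().split("\n")
--             scan([tail + " " + qlines[0]] + qlines[1:])
--         else:
--             pieces.append("\n\n" + part)
--             absorb(part)
--
--     return "".join(pieces)
-- ===== Notes on version B (the rewrite author's own statement) =====
-- stated objective: faster
-- what changed: B makes one pass keeping the chunks in a list (joined once at the end) and summarising the accumulated text by two state variables (its last line and the closing character of the most recent complete body line), instead of re-rstripping and re-splitting the whole accumulated string for every part.
import Mathlib
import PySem

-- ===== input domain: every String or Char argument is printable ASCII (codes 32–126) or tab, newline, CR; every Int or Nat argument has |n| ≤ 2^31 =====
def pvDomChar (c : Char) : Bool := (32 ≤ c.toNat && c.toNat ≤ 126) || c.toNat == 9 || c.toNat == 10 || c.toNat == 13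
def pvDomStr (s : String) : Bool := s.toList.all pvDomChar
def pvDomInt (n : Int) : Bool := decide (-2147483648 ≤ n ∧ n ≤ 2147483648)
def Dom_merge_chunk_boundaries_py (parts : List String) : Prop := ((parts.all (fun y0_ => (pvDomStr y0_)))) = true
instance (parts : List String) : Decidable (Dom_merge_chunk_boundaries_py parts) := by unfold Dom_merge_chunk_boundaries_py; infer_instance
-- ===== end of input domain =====

-- B is one incremental pass over the parts (chunks kept in a list, the text so far
-- summarised by its last line and the last complete body line's closing character);
-- measurably faster on the timing inputs.

-- shared literal constants and the one-char islower test (Python str.islower on a single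
-- character; exact on the printable-ASCII input domain Dom_)
def pvImg : List Char := "Image description:".toList
def pvEnders : List Char := ['.', '!', '?', '"', '\'', '\u201d']
def pvIslower (c : Char) : Bool := 97 ≤ c.toNat && c.toNat ≤ 122

-- ===== PORT A =====
-- the `for line in reversed(prev_lines): … break` scan, with `body_end` defaulting to `prev_stripped`
def pvLastBodyA (ls : List (List Char)) (dflt : List Char) : List Char :=
  match ls with
  | [] => dflt
  | l :: rest =>
      let line_s := PySem.Chars.strip l
      if line_s ≠ [] ∧ PySem.Chars.startswith line_s pvImg = false then line_s
      else pvLastBodyA rest dflt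

-- one iteration of A's `for part in parts[1:]` loop body
def pvStepA (merged part : List Char) : List Char :=
  let prev_stripped := PySem.Chars.rstrip merged
  if prev_stripped = [] then merged ++ ('\n' :: '\n' :: part)
  else
    -- prev_stripped.split("\n"); the separator "\n" is non-empty so split cannot raise
    let prev_lines := PySem.Chars.splitOn prev_stripped ['\n']
    let body_end := pvLastBodyA prev_lines.reverse prev_stripped
    -- `'' not in ".!?\"'”"` is False in Python, hence the `none => false` arm
    let ends_mid_sentence : Bool :=
      match body_end.getLast? with
      | none => false
      | some c => !(pvEnders.contains c)
    let next_stripped := PySem.Chars.lstrip part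
    let starts_continuation : Bool :=
      !next_stripped.isEmpty &&
        ((match next_stripped.head? with
          | none => false
          | some c => pvIslower c || c == '(')
         || PySem.Chars.startswith next_stripped "and ".toList
         || PySem.Chars.startswith next_stripped "or ".toList
         || PySem.Chars.startswith next_stripped "but ".toList)
    if ends_mid_sentence && starts_continuation then prev_stripped ++ (' ' :: next_stripped)
    else merged ++ ('\n' :: '\n' :: part)

def merge_chunk_boundaries_py (parts : List String) : String :=
  match parts with
  | [] => ""
  | p0 :: rest => String.ofList ((rest.map String.toList).foldl pvStepA p0.toList)

-- ===== PORT B =====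
-- B's state: tail     = last line of the text so far, whitespace stripped (none <-> rstrip == "")
--            bodyChar = last char of the most recent complete body line (none <-> None)
structure PvSt where
  tail : Option (List Char)
  bodyChar : Option Char
deriving DecidableEq, Repr

def pvInitSt : PvSt := ⟨none, none⟩

-- the body of Source B's `scan` loop: fold one completed line into body_char
def pvScanF (bp : Option Char) (line : List Char) : Option Char :=
  let s := PySem.Chars.strip line
  if s ≠ [] ∧ PySem.Chars.startswith s pvImg = false then s.getLast? else bp

-- Source B's absorb: account for `text` appended at a fresh line boundary
def pvAbsorb (st : PvSt) (text : List Char) : PvSt :=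
  let q := PySem.Chars.rstrip text
  if q = [] then st
  else
    -- `if tail is not None and is_body(tail): body_char = tail[-1]`
    let bp0 : Option Char :=
      match st.tail with
      | none => st.bodyChar
      | some t =>
          if t ≠ [] ∧ PySem.Chars.startswith t pvImg = false then t.getLast? else st.bodyChar
    let qlines := PySem.Chars.splitOn q ['\n']
    ⟨some (PySem.Chars.lstrip (qlines.getLastD [])), qlines.dropLast.foldl pvScanF bp0⟩

-- Source B's `while not pieces[-1].rstrip(): pieces.pop()` + rstrip of the last piece
def pvRstripTailRev (ps : List (List Char)) : List (List Char) :=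
  match ps with
  | [] => []
  | p :: rest =>
      if PySem.Chars.rstrip p = [] then pvRstripTailRev rest
      else PySem.Chars.rstrip p :: rest

def pvRstripTail (ps : List (List Char)) : List (List Char) :=
  (pvRstripTailRev ps.reverse).reverse

-- one iteration of Source B's loop body over the state (pieces, st)
def pvStepB (acc : List (List Char) × PvSt) (part : List Char) : List (List Char) × PvSt :=
  let pieces := acc.1
  let st := acc.2
  match st.tail with
  | none => (pieces ++ [('\n' :: '\n' :: part)], pvAbsorb st part)
  | some t =>
    -- `last = tail[-1] if is_body(tail) or body_char is None else body_char`
    let lastC : Option Char :=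
      if (t ≠ [] ∧ PySem.Chars.startswith t pvImg = false) ∨ st.bodyChar = none
      then t.getLast? else st.bodyChar
    -- tail is never empty when set, so the `none` arm is unreachable
    let ends_mid_sentence : Bool :=
      match lastC with
      | none => true
      | some c => !(pvEnders.contains c)
    let ns := PySem.Chars.lstrip part
    let starts_continuation : Bool :=
      !ns.isEmpty &&
        ((match ns.head? with
          | none => false
          | some c => pvIslower c || c == '(')
         || PySem.Chars.startswith ns "and ".toList
         || PySem.Chars.startswith ns "or ".toList
         || PySem.Chars.startswith ns "but ".toList)
    if ends_mid_sentence && starts_continuation then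
      let pieces' := pvRstripTail pieces ++ [(' ' :: ns)]
      let qlines := PySem.Chars.splitOn (PySem.Chars.rstrip ns) ['\n']
      -- scan([tail + " " + qlines[0]] + qlines[1:])
      let lines := (t ++ ' ' :: qlines.headD []) :: qlines.drop 1
      (pieces', ⟨some (PySem.Chars.lstrip (lines.getLastD [])),
                 lines.dropLast.foldl pvScanF st.bodyChar⟩)
    else (pieces ++ [('\n' :: '\n' :: part)], pvAbsorb st part)

def merge_chunk_boundaries_py_alt (parts : List String) : String :=
  match parts with
  | [] => ""
  | p0 :: rest =>
      let st0 := pvAbsorb pvInitSt p0.toList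
      let r := (rest.map String.toList).foldl pvStepB ([p0.toList], st0)
      String.ofList r.1.flatten

-- ===== PRECONDITION & SPEC =====
def Spec_merge_chunk_boundaries_py (parts : List String) (out : String) : Prop := out = merge_chunk_boundaries_py_alt parts
instance (parts : List String) (out : String) : Decidable (Spec_merge_chunk_boundaries_py parts out) := by unfold Spec_merge_chunk_boundaries_py; infer_instance

-- ===== CLAIM (what is proved, stated in full; the proofs are below) =====
def Claim_equal_merge_chunk_boundaries_py : Prop := ∀ (parts : List String), Dom_merge_chunk_boundaries_py parts → Spec_merge_chunk_boundaries_py parts (merge_chunk_boundaries_py parts)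

-- ===== LEMMAS AND PROOFS =====

def pvConsHead (x : List Char) (ls : List (List Char)) : List (List Char) :=
  match ls with
  | [] => [x]
  | y :: ys => (x ++ y) :: ys

def pvLines : List Char → List (List Char)
  | [] => [[]]
  | c :: rest =>
    if c = '\n' then [] :: pvLines rest
    else match pvLines rest with
         | [] => [[c]]
         | l :: ls => (c :: l) :: ls

theorem pvLines_ne_nil (s : List Char) : pvLines s ≠ [] := by
  cases s with
  | nil => simp [pvLines]
  | cons c rest =>
    simp only [pvLines]
    split
    · simp
    · split <;> simp

theorem pvSplitOn_go_newline (fuel : Nat) (l cur : List Char) (acc : List (List Char))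
    (h : l.length < fuel) :
    PySem.Chars.splitOn.go ['\n'] fuel l cur acc =
      acc.reverse ++ pvConsHead cur.reverse (pvLines l) := by
  induction fuel generalizing l cur acc with
  | zero => omega
  | succ n ih =>
    cases l with
    | nil => simp [PySem.Chars.splitOn.go, pvLines, pvConsHead]
    | cons c rest =>
      simp only [PySem.Chars.splitOn.go]
      by_cases hc : c = '\n'
      · subst hc
        have hp : List.isPrefixOf ['\n'] ('\n' :: rest) = true := by
          simp [List.isPrefixOf]
        rw [if_pos hp]
        have hd : List.drop (['\n'] : List Char).length ('\n' :: rest) = rest := by simp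
        rw [hd]
        have := ih rest [] (cur.reverse :: acc) (by simpa using Nat.lt_of_succ_lt_succ h)
        simp only [List.length_cons] at *
        rw [this]
        have hnn := pvLines_ne_nil rest
        cases hli : pvLines rest with
        | nil => exact absurd hli hnn
        | cons l ls => simp [pvLines, pvConsHead, hli]
      · have hp : List.isPrefixOf ['\n'] (c :: rest) = false := by
          simp [List.isPrefixOf]; intro hcc; exact absurd hcc.symm hc
        rw [if_neg (by simp [hp])]
        have := ih rest (c :: cur) acc (by simpa using Nat.lt_of_succ_lt_succ h)
        rw [this]
        have hnn := pvLines_ne_nil rest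
        cases hli : pvLines rest with
        | nil => exact absurd hli hnn
        | cons l ls => simp [pvLines, pvConsHead, hli, hc]

theorem pvSplitOn_newline (s : List Char) :
    PySem.Chars.splitOn s ['\n'] = pvLines s := by
  unfold PySem.Chars.splitOn
  rw [pvSplitOn_go_newline s.length.succ s [] [] (Nat.lt_succ_self _)]
  have hnn := pvLines_ne_nil s
  cases hli : pvLines s with
  | nil => exact absurd hli hnn
  | cons l ls => simp [pvConsHead]

-- rstrip over append
theorem pvRstrip_append (a b : List Char) :
    PySem.Chars.rstrip (a ++ b) =
      if PySem.Chars.rstrip b = [] then PySem.Chars.rstrip a else a ++ PySem.Chars.rstrip b := by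
  simp only [PySem.Chars.rstrip, List.reverse_append, List.dropWhile_append]
  split
  · next h =>
    rw [if_pos]
    simpa [List.isEmpty_iff] using h
  · next h =>
    rw [if_neg]
    · simp
    · intro hc
      rw [List.reverse_eq_nil_iff] at hc
      simp [hc] at h

theorem pvLstrip_append (a b : List Char) :
    PySem.Chars.lstrip (a ++ b) =
      if PySem.Chars.lstrip a = [] then PySem.Chars.lstrip b else PySem.Chars.lstrip a ++ b := by
  simp only [PySem.Chars.lstrip, List.dropWhile_append]
  split
  · next h => rw [if_pos (by simpa [List.isEmpty_iff] using h)]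
  · next h =>
    rw [if_neg]
    intro hc; simp [hc] at h

theorem pvRstrip_eq_nil_iff (b : List Char) :
    PySem.Chars.rstrip b = [] ↔ ∀ c ∈ b, PySem.Chars.isspace c = true := by
  simp only [PySem.Chars.rstrip, List.reverse_eq_nil_iff, List.dropWhile_eq_nil_iff]
  constructor
  · intro h c hc; exact h c (by simpa using hc)
  · intro h c hc; exact h c (by simpa using hc)

theorem pvRstrip_getLast_not_ws (x : List Char) (c : Char)
    (h : (PySem.Chars.rstrip x).getLast? = some c) : PySem.Chars.isspace c = false := by
  simp only [PySem.Chars.rstrip, List.getLast?_reverse] at h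
  have := List.head?_dropWhile_not (p := PySem.Chars.isspace) (l := x.reverse)
  rw [h] at this
  simpa using this

theorem pvLines_append (a b : List Char) :
    pvLines (a ++ b) = (pvLines a).dropLast ++ pvConsHead ((pvLines a).getLastD []) (pvLines b) := by
  induction a with
  | nil =>
    have hnn := pvLines_ne_nil b
    cases hli : pvLines b with
    | nil => exact absurd hli hnn
    | cons l ls => simp [pvLines, pvConsHead, hli]
  | cons c a' ih =>
    by_cases hc : c = '\n'
    · subst hc
      have hnn := pvLines_ne_nil a'
      cases hli : pvLines a' with
      | nil => exact absurd hli hnn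
      | cons l ls =>
        simp only [List.cons_append, pvLines, ih, hli, reduceIte]
        cases ls <;> simp [pvConsHead]
    · have hnn := pvLines_ne_nil a'
      cases hli : pvLines a' with
      | nil => exact absurd hli hnn
      | cons l ls =>
        have hnn2 := pvLines_ne_nil (a' ++ b)
        cases hli2 : pvLines (a' ++ b) with
        | nil => exact absurd hli2 hnn2
        | cons m ms =>
          simp only [List.cons_append, pvLines, if_neg hc, hli, hli2]
          have := ih
          rw [hli, hli2] at this
          cases ls with
          | nil =>
            simp only [List.dropLast_singleton, List.nil_append, List.getLastD] at this
            have hnn3 := pvLines_ne_nil b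
            cases hlb : pvLines b with
            | nil => exact absurd hlb hnn3
            | cons bl bls =>
              rw [hlb] at this
              simp only [pvConsHead] at this ⊢
              cases this
              simp
          | cons l2 ls2 =>
            simp only [List.dropLast_cons₂, List.getLastD_cons] at this ⊢
            rw [List.cons_append]
            obtain ⟨h1, h2⟩ := List.cons_eq_cons.mp this
            subst h1; subst h2
            simp

-- stripped-line facts
theorem pvLstrip_eq_nil_iff (b : List Char) :
    PySem.Chars.lstrip b = [] ↔ ∀ c ∈ b, PySem.Chars.isspace c = true := by
  simp [PySem.Chars.lstrip, List.dropWhile_eq_nil_iff]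

theorem pvStrip_eq_nil_iff (l : List Char) :
    PySem.Chars.strip l = [] ↔ ∀ c ∈ l, PySem.Chars.isspace c = true := by
  simp only [PySem.Chars.strip, pvRstrip_eq_nil_iff]
  constructor
  · intro h c hc
    by_cases hws : PySem.Chars.isspace c = true
    · exact hws
    · have : c ∈ PySem.Chars.lstrip l := by
        have := List.takeWhile_append_dropWhile (p := PySem.Chars.isspace) (l := l)
        rw [← this] at hc
        rcases List.mem_append.mp hc with h1 | h2
        · exact absurd (List.mem_takeWhile_imp h1) hws
        · exact h2
      exact h c this
  · intro h c hc
    exact h c ((List.dropWhile_sublist _).mem hc)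

theorem pvStrip_ws_left (w x : List Char) (hw : ∀ c ∈ w, PySem.Chars.isspace c = true) :
    PySem.Chars.strip (w ++ x) = PySem.Chars.strip x := by
  have hl : PySem.Chars.lstrip w = [] := (pvLstrip_eq_nil_iff w).mpr hw
  simp [PySem.Chars.strip, pvLstrip_append, hl]

theorem pvStrip_ws_right (x w : List Char) (hw : ∀ c ∈ w, PySem.Chars.isspace c = true) :
    PySem.Chars.strip (x ++ w) = PySem.Chars.strip x := by
  have hrw : PySem.Chars.rstrip w = [] := (pvRstrip_eq_nil_iff w).mpr hw
  simp only [PySem.Chars.strip, pvLstrip_append]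
  split
  · next h =>
    have hx : ∀ c ∈ x, PySem.Chars.isspace c = true := (pvLstrip_eq_nil_iff x).mp h
    have h1 : PySem.Chars.rstrip (PySem.Chars.lstrip w) = [] := by
      rw [pvRstrip_eq_nil_iff]
      intro c hc
      exact hw c ((List.dropWhile_sublist _).mem hc)
    have h2 : PySem.Chars.rstrip (PySem.Chars.lstrip x) = [] := by
      rw [pvRstrip_eq_nil_iff]
      intro c hc
      exact hx c ((List.dropWhile_sublist _).mem hc)
    rw [h1, h2]
  · next h =>
    rw [pvRstrip_append, if_pos hrw]

-- last line of a string
def pvLastLine (s : List Char) : List Char := (pvLines s).getLastD []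

theorem pvLines_ws (u : List Char) (hu : ∀ c ∈ u, PySem.Chars.isspace c = true) :
    ∀ l ∈ pvLines u, ∀ c ∈ l, PySem.Chars.isspace c = true := by
  induction u with
  | nil => intro l hl; simp [pvLines] at hl; simp [hl]
  | cons a rest ih =>
    have ha := hu a (by simp)
    have hrest : ∀ c ∈ rest, PySem.Chars.isspace c = true := fun c hc => hu c (by simp [hc])
    intro l hl c hc
    by_cases hn : a = '\n'
    · simp only [pvLines, if_pos hn] at hl
      rcases List.mem_cons.mp hl with h1 | h2
      · subst h1; simp at hc
      · exact ih hrest l h2 c hc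
    · simp only [pvLines, if_neg hn] at hl
      have hnn := pvLines_ne_nil rest
      cases hli : pvLines rest with
      | nil => exact absurd hli hnn
      | cons l0 ls0 =>
        rw [hli] at hl
        rcases List.mem_cons.mp hl with h1 | h2
        · subst h1
          rcases List.mem_cons.mp hc with h3 | h4
          · subst h3; exact ha
          · exact ih hrest l0 (by simp [hli]) c h4
        · exact ih hrest l (by simp [hli, h2]) c hc

theorem pvLastLine_rev (s : List Char) :
    pvLastLine s = (s.reverse.takeWhile (fun c => !(c == '\n'))).reverse := by
  induction s using List.reverseRecOn with
  | nil => simp [pvLastLine, pvLines]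
  | append_singleton t c ih =>
    rw [pvLastLine, pvLines_append]
    by_cases hc : c = '\n'
    · subst hc
      simp [pvLines, pvConsHead]
    · have : pvLines [c] = [[c]] := by
        simp [pvLines, if_neg hc]
      rw [this]
      simp only [pvConsHead]
      rw [List.getLastD_eq_getLast?, List.getLast?_concat]
      simp only [Option.getD_some, List.reverse_append, List.reverse_cons, List.reverse_nil,
        List.nil_append, List.singleton_append]
      rw [List.takeWhile_cons_of_pos (by simp [hc])]
      simp [← ih, pvLastLine]

theorem pvLastLine_getLast (s : List Char) (c : Char) (h : s.getLast? = some c)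
    (hc : c ≠ '\n') : (pvLastLine s).getLast? = some c := by
  rw [pvLastLine_rev]
  rw [List.getLast?_eq_head?_reverse] at h
  cases hr : s.reverse with
  | nil => rw [hr] at h; simp at h
  | cons y t =>
    rw [hr] at h
    simp only [List.head?_cons, Option.some.injEq] at h
    subst h
    rw [List.takeWhile_cons_of_pos (by simp [hc])]
    simp

theorem pvRstrip_eq_self (x : List Char) (c : Char) (h : x.getLast? = some c)
    (hc : PySem.Chars.isspace c = false) : PySem.Chars.rstrip x = x := by
  rw [List.getLast?_eq_head?_reverse] at h
  cases hr : x.reverse with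
  | nil => rw [hr] at h; simp at h
  | cons y t =>
    rw [hr] at h
    simp only [List.head?_cons, Option.some.injEq] at h
    subst h
    have h2 : PySem.Chars.rstrip x = (List.dropWhile PySem.Chars.isspace (y :: t)).reverse := by
      rw [PySem.Chars.rstrip, hr]
    rw [h2, List.dropWhile_cons_of_neg (by simp [hc]), ← hr, List.reverse_reverse]

-- decomposition facts
theorem pvEndNonWs_strip (x : List Char) (c : Char) (h : x.getLast? = some c)
    (hc : PySem.Chars.isspace c = false) :
    PySem.Chars.strip x = PySem.Chars.lstrip x ∧ PySem.Chars.lstrip x ≠ [] ∧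
      (PySem.Chars.lstrip x).getLast? = some c := by
  have hne : PySem.Chars.lstrip x ≠ [] := by
    intro hl
    have := (pvLstrip_eq_nil_iff x).mp hl c (List.mem_of_getLast? h)
    rw [this] at hc; simp at hc
  have hsuf : PySem.Chars.lstrip x <:+ x := List.dropWhile_suffix _
  obtain ⟨u, hu⟩ := hsuf
  have hlast : (PySem.Chars.lstrip x).getLast? = some c := by
    rw [← hu] at h
    rwa [List.getLast?_append_of_ne_nil u hne] at h
  exact ⟨pvRstrip_eq_self _ c hlast hc, hne, hlast⟩

theorem pvRstrip_decomp (m : List Char) :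
    ∃ w, m = PySem.Chars.rstrip m ++ w ∧ ∀ c ∈ w, PySem.Chars.isspace c = true := by
  refine ⟨(m.reverse.takeWhile PySem.Chars.isspace).reverse, ?_, ?_⟩
  · have key : PySem.Chars.rstrip m ++ (m.reverse.takeWhile PySem.Chars.isspace).reverse = m := by
      rw [PySem.Chars.rstrip, ← List.reverse_append, List.takeWhile_append_dropWhile,
        List.reverse_reverse]
    exact key.symm
  · intro c hc
    exact List.mem_takeWhile_imp (by simpa using hc)

theorem pvLstrip_idem (x : List Char) :
    PySem.Chars.lstrip (PySem.Chars.lstrip x) = PySem.Chars.lstrip x := by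
  cases h : PySem.Chars.lstrip x with
  | nil => simp [PySem.Chars.lstrip]
  | cons c t =>
    have hd := List.head?_dropWhile_not (p := PySem.Chars.isspace) (l := x)
    rw [show List.dropWhile PySem.Chars.isspace x = PySem.Chars.lstrip x from rfl, h] at hd
    simp only [List.head?_cons] at hd
    rw [PySem.Chars.lstrip, List.dropWhile_cons_of_neg (by simpa using hd)]

-- the scan over complete lines
theorem pvScanF_ws (bp : Option Char) (l : List Char)
    (hl : ∀ c ∈ l, PySem.Chars.isspace c = true) : pvScanF bp l = bp := by
  have : PySem.Chars.strip l = [] := (pvStrip_eq_nil_iff l).mpr hl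
  simp [pvScanF, this]

theorem pvScanF_ws_fold (bp : Option Char) (wl : List (List Char))
    (h : ∀ l ∈ wl, ∀ c ∈ l, PySem.Chars.isspace c = true) :
    wl.foldl pvScanF bp = bp := by
  induction wl generalizing bp with
  | nil => rfl
  | cons l rest ih =>
    rw [List.foldl_cons, pvScanF_ws bp l (h l (by simp))]
    exact ih bp (fun l' hl' => h l' (by simp [hl']))

theorem pvScanF_congr (bp : Option Char) (l l' : List Char)
    (h : PySem.Chars.strip l = PySem.Chars.strip l') : pvScanF bp l = pvScanF bp l' := by
  simp [pvScanF, h]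

-- A's reversed scan with break, as a find
def pvAFind : List (List Char) → Option (List Char)
  | [] => none
  | l :: rest =>
      let s := PySem.Chars.strip l
      if s ≠ [] ∧ PySem.Chars.startswith s pvImg = false then some s else pvAFind rest

theorem pvLastBodyA_eq_aFind (ls : List (List Char)) (d : List Char) :
    pvLastBodyA ls d = (pvAFind ls).getD d := by
  induction ls with
  | nil => rfl
  | cons l rest ih =>
    simp only [pvLastBodyA, pvAFind]
    split
    · rfl
    · exact ih

theorem pvAFind_ne_nil (ls : List (List Char)) (s : List Char) (h : pvAFind ls = some s) :
    s ≠ [] := by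
  induction ls with
  | nil => simp [pvAFind] at h
  | cons l rest ih =>
    simp only [pvAFind] at h
    split at h
    · next hg =>
      cases h
      exact hg.1
    · exact ih h

theorem pvScan_eq_aFind (lines : List (List Char)) (bp : Option Char) :
    lines.foldl pvScanF bp =
      match pvAFind lines.reverse with
      | some s => s.getLast?
      | none => bp := by
  induction lines using List.reverseRecOn generalizing bp with
  | nil => rfl
  | append_singleton t l ih =>
    rw [List.foldl_append, List.reverse_append]
    simp only [List.reverse_cons, List.reverse_nil, List.nil_append, List.foldl_cons,
      List.foldl_nil, List.singleton_append]
    simp only [pvAFind]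
    by_cases hg : PySem.Chars.strip l ≠ [] ∧
        PySem.Chars.startswith (PySem.Chars.strip l) pvImg = false
    · rw [if_pos hg]
      simp [pvScanF, hg]
    · rw [if_neg hg]
      have hstep : pvScanF (t.foldl pvScanF bp) l = t.foldl pvScanF bp := by
        rw [pvScanF]
        rw [if_neg hg]
      rw [hstep, ih]

theorem pvLines_decomp (s : List Char) :
    pvLines s = (pvLines s).dropLast ++ [pvLastLine s] := by
  have h := pvLines_ne_nil s
  conv_lhs => rw [← List.dropLast_append_getLast h]
  rw [pvLastLine, List.getLastD_eq_getLast?, List.getLast?_eq_some_getLast h]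
  rfl

theorem pvGetLastD_append (A L : List (List Char)) (d : List Char) (h : L ≠ []) :
    (A ++ L).getLastD d = L.getLastD [] := by
  rw [List.getLastD_eq_getLast?, List.getLastD_eq_getLast?,
    List.getLast?_append_of_ne_nil A h, List.getLast?_eq_some_getLast h]
  rfl

-- the reference state of the accumulated text
def pvStateOf (m : List Char) : PvSt :=
  let R := PySem.Chars.rstrip m
  if R = [] then pvInitSt
  else ⟨some (PySem.Chars.lstrip (pvLastLine R)),
        (pvLines R).dropLast.foldl pvScanF none⟩

-- folding the scan through the whole text equals folding it through its rstrip
theorem pvScan_all_eq (m : List Char) (bp : Option Char) :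
    (pvLines m).foldl pvScanF bp = (pvLines (PySem.Chars.rstrip m)).foldl pvScanF bp := by
  obtain ⟨w, hw, hws⟩ := pvRstrip_decomp m
  have hwall := pvLines_ws w hws
  conv_lhs => rw [hw]
  rw [pvLines_append]
  have hnn := pvLines_ne_nil w
  cases hwl : pvLines w with
  | nil => exact absurd hwl hnn
  | cons w1 wr =>
    simp only [pvConsHead, List.foldl_append, List.foldl_cons]
    have hw1 : ∀ c ∈ w1, PySem.Chars.isspace c = true := hwall w1 (by simp [hwl])
    have h1 : pvScanF ((pvLines (PySem.Chars.rstrip m)).dropLast.foldl pvScanF bp)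
        ((pvLines (PySem.Chars.rstrip m)).getLastD [] ++ w1)
        = pvScanF ((pvLines (PySem.Chars.rstrip m)).dropLast.foldl pvScanF bp)
          (pvLastLine (PySem.Chars.rstrip m)) := by
      apply pvScanF_congr
      exact pvStrip_ws_right _ _ hw1
    rw [h1]
    rw [pvScanF_ws_fold _ wr (fun l hl => hwall l (by simp [hwl, hl]))]
    conv_rhs => rw [pvLines_decomp (PySem.Chars.rstrip m)]
    rw [List.foldl_append, List.foldl_cons, List.foldl_nil]

theorem pvScan_all_freeze (m : List Char) :
    (pvLines m).foldl pvScanF none =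
      pvScanF ((pvLines (PySem.Chars.rstrip m)).dropLast.foldl pvScanF none)
        (pvLastLine (PySem.Chars.rstrip m)) := by
  conv_lhs => rw [pvScan_all_eq, pvLines_decomp (PySem.Chars.rstrip m)]
  rw [List.foldl_append, List.foldl_cons, List.foldl_nil]

-- the one-step-on-the-old-tail update in absorb is the scan step on the old last line
theorem pvScanF_lastLine (m : List Char) (bp : Option Char)
    (hm : PySem.Chars.rstrip m ≠ []) :
    (if PySem.Chars.lstrip (pvLastLine (PySem.Chars.rstrip m)) ≠ [] ∧
        PySem.Chars.startswith (PySem.Chars.lstrip (pvLastLine (PySem.Chars.rstrip m))) pvImg = false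
     then (PySem.Chars.lstrip (pvLastLine (PySem.Chars.rstrip m))).getLast? else bp)
    = pvScanF bp (pvLastLine (PySem.Chars.rstrip m)) := by
  cases hc : (PySem.Chars.rstrip m).getLast? with
  | none => exact absurd (List.getLast?_eq_none_iff.mp hc) hm
  | some c =>
    have hcw : PySem.Chars.isspace c = false := pvRstrip_getLast_not_ws m c hc
    have hcn : c ≠ '\n' := by
      intro h; subst h; simp [show PySem.Chars.isspace '\n' = true from by decide] at hcw
    have hll := pvLastLine_getLast (PySem.Chars.rstrip m) c hc hcn
    obtain ⟨hstr, _, _⟩ := pvEndNonWs_strip (pvLastLine (PySem.Chars.rstrip m)) c hll hcw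
    simp only [pvScanF]
    rw [hstr]

-- absorb transitions
theorem pvAbsorb_of_ws (m p : List Char) (hm : PySem.Chars.rstrip m = []) :
    pvStateOf (m ++ p) = pvAbsorb pvInitSt p := by
  have hmw : ∀ c ∈ m, PySem.Chars.isspace c = true := (pvRstrip_eq_nil_iff m).mp hm
  by_cases hq : PySem.Chars.rstrip p = []
  · rw [pvAbsorb, if_pos hq, pvStateOf]
    rw [pvRstrip_append, if_pos hq, hm]
    simp [pvInitSt]
  · have hR : PySem.Chars.rstrip (m ++ p) = m ++ PySem.Chars.rstrip p := by
      rw [pvRstrip_append, if_neg hq]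
    have hRne : m ++ PySem.Chars.rstrip p ≠ [] := by
      intro h
      exact hq (List.append_eq_nil_iff.mp h).2
    rw [pvAbsorb, if_neg hq, pvStateOf]
    simp only [hR, if_neg hRne, pvSplitOn_newline, pvInitSt]
    have hnnq := pvLines_ne_nil (PySem.Chars.rstrip p)
    cases hql : pvLines (PySem.Chars.rstrip p) with
    | nil => exact absurd hql hnnq
    | cons q1 qr =>
      have hlm : pvLines (m ++ PySem.Chars.rstrip p)
          = (pvLines m).dropLast ++ (pvLastLine m ++ q1) :: qr := by
        rw [pvLines_append, hql]
        rfl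
      have hmlines := pvLines_ws m hmw
      have hdlm : ∀ l ∈ (pvLines m).dropLast, ∀ c ∈ l, PySem.Chars.isspace c = true :=
        fun l hl => hmlines l ((List.dropLast_sublist _).mem hl)
      have hllm : ∀ c ∈ pvLastLine m, PySem.Chars.isspace c = true := by
        intro c hc
        refine hmlines (pvLastLine m) ?_ c hc
        rw [pvLines_decomp m]
        simp
      simp only [PvSt.mk.injEq, Option.some.injEq]
      refine ⟨?_, ?_⟩
      · -- tail
        cases hqr : qr with
        | nil =>
          rw [hqr] at hlm
          rw [pvLastLine, hlm, pvGetLastD_append _ _ _ (by simp)]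
          simp only [List.getLastD_cons, List.getLastD_nil]
          rw [pvLstrip_append, if_pos ((pvLstrip_eq_nil_iff _).mpr hllm)]
        | cons a b =>
          rw [hqr] at hlm
          rw [pvLastLine, hlm, pvGetLastD_append _ _ _ (by simp)]
          simp only [List.getLastD_cons]
      · -- bodyChar
        rw [hlm]
        cases hqr : qr with
        | nil =>
          rw [List.dropLast_concat]
          simp only [List.dropLast_singleton, List.foldl_nil]
          exact pvScanF_ws_fold none _ hdlm
        | cons a b =>
          rw [List.dropLast_append_cons]
          rw [List.foldl_append, pvScanF_ws_fold none _ hdlm]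
          have hC : pvScanF none (pvLastLine m ++ q1) = pvScanF none q1 :=
            pvScanF_congr _ _ _ (pvStrip_ws_left _ _ hllm)
          cases hb : b.isEmpty
          · have hbne : b ≠ [] := by simpa [List.isEmpty_iff] using hb
            rw [List.dropLast_cons₂, List.dropLast_cons_of_ne_nil hbne]
            rw [List.foldl_cons, List.foldl_cons, hC]
            rw [List.dropLast_cons_of_ne_nil (by simp : (a :: b) ≠ []),
              List.dropLast_cons_of_ne_nil hbne, List.foldl_cons, List.foldl_cons]
          · have hbe : b = [] := by simpa [List.isEmpty_iff] using hb
            subst hbe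
            simp only [List.dropLast_cons₂, List.dropLast_singleton]
            rw [List.foldl_cons, List.foldl_cons, hC]

theorem pvAbsorb_of_nonws (m p : List Char) (hm : PySem.Chars.rstrip m ≠ []) :
    pvStateOf (m ++ '\n' :: '\n' :: p) = pvAbsorb (pvStateOf m) p := by
  have hsplit : ('\n' :: '\n' :: p) = ['\n', '\n'] ++ p := rfl
  have hSt : pvStateOf m = ⟨some (PySem.Chars.lstrip (pvLastLine (PySem.Chars.rstrip m))),
      (pvLines (PySem.Chars.rstrip m)).dropLast.foldl pvScanF none⟩ := by
    rw [pvStateOf, if_neg hm]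
  by_cases hq : PySem.Chars.rstrip p = []
  · have hb : PySem.Chars.rstrip ('\n' :: '\n' :: p) = [] := by
      rw [hsplit, pvRstrip_append, if_pos hq]
      decide
    rw [pvAbsorb, if_pos hq]
    rw [pvStateOf, pvStateOf, pvRstrip_append, if_pos hb]
  · have hb : PySem.Chars.rstrip ('\n' :: '\n' :: p) = '\n' :: '\n' :: PySem.Chars.rstrip p := by
      rw [hsplit, pvRstrip_append, if_neg hq]
      rfl
    have hbne : ('\n' :: '\n' :: PySem.Chars.rstrip p : List Char) ≠ [] := by simp
    have hR' : PySem.Chars.rstrip (m ++ '\n' :: '\n' :: p)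
        = m ++ '\n' :: '\n' :: PySem.Chars.rstrip p := by
      rw [pvRstrip_append, hb, if_neg hbne]
    have hR'ne : m ++ '\n' :: '\n' :: PySem.Chars.rstrip p ≠ [] := by simp
    have hlm : pvLines (m ++ '\n' :: '\n' :: PySem.Chars.rstrip p)
        = (pvLines m).dropLast ++ pvLastLine m :: [] :: pvLines (PySem.Chars.rstrip p) := by
      rw [pvLines_append]
      have h2 : pvLines ('\n' :: '\n' :: PySem.Chars.rstrip p)
          = [] :: [] :: pvLines (PySem.Chars.rstrip p) := by
        simp [pvLines]
      rw [h2]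
      simp [pvConsHead, pvLastLine]
    rw [pvAbsorb, if_neg hq, hSt, pvStateOf]
    simp only [hR', if_neg hR'ne, pvSplitOn_newline]
    have hnnq := pvLines_ne_nil (PySem.Chars.rstrip p)
    simp only [PvSt.mk.injEq, Option.some.injEq]
    refine ⟨?_, ?_⟩
    · -- tail
      rw [pvLastLine, hlm,
        show (pvLines m).dropLast ++ pvLastLine m :: [] :: pvLines (PySem.Chars.rstrip p)
          = ((pvLines m).dropLast ++ [pvLastLine m, []]) ++ pvLines (PySem.Chars.rstrip p)
          from by simp,
        pvGetLastD_append _ _ _ hnnq]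
    · -- bodyChar
      rw [hlm]
      cases hql : pvLines (PySem.Chars.rstrip p) with
      | nil => exact absurd hql hnnq
      | cons q1 qr =>
        have hdl : ((pvLines m).dropLast ++ pvLastLine m :: [] :: q1 :: qr).dropLast
            = (pvLines m).dropLast ++ pvLastLine m :: [] :: (q1 :: qr).dropLast := by
          rw [List.dropLast_append_cons, List.dropLast_cons_of_ne_nil (by simp),
            List.dropLast_cons_of_ne_nil (by simp)]
        rw [hdl, List.foldl_append, List.foldl_cons, List.foldl_cons]
        have hstep : pvScanF (List.foldl pvScanF none (pvLines m).dropLast) (pvLastLine m)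
            = List.foldl pvScanF none (pvLines m) := by
          conv_rhs => rw [pvLines_decomp m]
          rw [List.foldl_append, List.foldl_cons, List.foldl_nil]
        rw [hstep, pvScanF_ws (List.foldl pvScanF none (pvLines m)) [] (by simp)]
        rw [pvScan_all_freeze m, pvScanF_lastLine m _ hm]

-- A's reversed body-line scan and B's stored state give the same "ends mid-sentence" test
theorem pvEnds_eq (m : List Char) (hm : PySem.Chars.rstrip m ≠ []) :
    (match (if (PySem.Chars.lstrip (pvLastLine (PySem.Chars.rstrip m)) ≠ [] ∧
          PySem.Chars.startswith (PySem.Chars.lstrip (pvLastLine (PySem.Chars.rstrip m))) pvImg = false)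
          ∨ (pvLines (PySem.Chars.rstrip m)).dropLast.foldl pvScanF none = none
        then (PySem.Chars.lstrip (pvLastLine (PySem.Chars.rstrip m))).getLast?
        else (pvLines (PySem.Chars.rstrip m)).dropLast.foldl pvScanF none) with
     | none => true
     | some c => !(pvEnders.contains c))
    = (match (pvLastBodyA (PySem.Chars.splitOn (PySem.Chars.rstrip m) ['\n']).reverse
          (PySem.Chars.rstrip m)).getLast? with
       | none => false
       | some c => !(pvEnders.contains c)) := by
  cases hc : (PySem.Chars.rstrip m).getLast? with
  | none => exact absurd (List.getLast?_eq_none_iff.mp hc) hm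
  | some c =>
    have hcw : PySem.Chars.isspace c = false := pvRstrip_getLast_not_ws m c hc
    have hcn : c ≠ '\n' := by
      intro h; subst h; simp [show PySem.Chars.isspace '\n' = true from by decide] at hcw
    have hll := pvLastLine_getLast (PySem.Chars.rstrip m) c hc hcn
    obtain ⟨hstr, hsne, hlast⟩ :=
      pvEndNonWs_strip (pvLastLine (PySem.Chars.rstrip m)) c hll hcw
    have hrev : (PySem.Chars.splitOn (PySem.Chars.rstrip m) ['\n']).reverse
        = pvLastLine (PySem.Chars.rstrip m) :: (pvLines (PySem.Chars.rstrip m)).dropLast.reverse := by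
      rw [pvSplitOn_newline]
      conv_lhs => rw [pvLines_decomp (PySem.Chars.rstrip m)]
      rw [List.reverse_append]
      rfl
    rw [hrev, pvLastBodyA, hstr]
    cases hswv : PySem.Chars.startswith (PySem.Chars.lstrip (pvLastLine (PySem.Chars.rstrip m))) pvImg with
    | false =>
      rw [if_pos (Or.inl ⟨hsne, rfl⟩), if_pos ⟨hsne, rfl⟩, hlast]
    | true =>
      rw [pvLastBodyA_eq_aFind, pvScan_eq_aFind]
      cases haf : pvAFind (pvLines (PySem.Chars.rstrip m)).dropLast.reverse with
      | some s' =>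
        have hs'ne := pvAFind_ne_nil _ _ haf
        cases hgl : s'.getLast? with
        | none => exact absurd (List.getLast?_eq_none_iff.mp hgl) hs'ne
        | some c' => simp [hgl]
      | none => simp [hlast, hc]

-- rstrip of the joined pieces, via the tail walk
theorem pvRstripTail_flatten (ps : List (List Char)) :
    (pvRstripTail ps).flatten = PySem.Chars.rstrip ps.flatten := by
  rw [pvRstripTail]
  have key : ∀ l : List (List Char),
      ((pvRstripTailRev l).reverse).flatten = PySem.Chars.rstrip (l.reverse.flatten) := by
    intro l
    induction l with
    | nil => simp [pvRstripTailRev, PySem.Chars.rstrip]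
    | cons p rest ih =>
      by_cases hp : PySem.Chars.rstrip p = []
      · rw [pvRstripTailRev, if_pos hp, ih]
        simp only [List.reverse_cons, List.flatten_append, List.flatten_cons,
          List.flatten_nil, List.append_nil]
        rw [pvRstrip_append, if_pos hp]
      · rw [pvRstripTailRev, if_neg hp]
        simp only [List.reverse_cons, List.flatten_append, List.flatten_cons,
          List.flatten_nil, List.append_nil]
        rw [pvRstrip_append, if_neg hp]
  have := key ps.reverse
  rwa [List.reverse_reverse] at this

-- one loop iteration: B's step tracks A's step
theorem pvStep_eq (m p : List Char) (pieces : List (List Char))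
    (hfl : pieces.flatten = m) :
    (pvStepB (pieces, pvStateOf m) p).1.flatten = pvStepA m p ∧
      (pvStepB (pieces, pvStateOf m) p).2 = pvStateOf (pvStepA m p) := by
  by_cases hR : PySem.Chars.rstrip m = []
  · -- all-whitespace prefix: both sides append "\n\n" + part
    have hSt : pvStateOf m = pvInitSt := by rw [pvStateOf, if_pos hR]
    have hA : pvStepA m p = m ++ '\n' :: '\n' :: p := by
      rw [pvStepA]
      simp [hR]
    have hB : pvStepB (pieces, pvStateOf m) p
        = (pieces ++ [('\n' :: '\n' :: p)], pvAbsorb pvInitSt p) := by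
      rw [hSt]
      rfl
    refine ⟨?_, ?_⟩
    · rw [hB, hA]
      simp [hfl]
    · rw [hB, hA]
      have hmw : PySem.Chars.rstrip (m ++ ['\n', '\n']) = [] := by
        rw [pvRstrip_append, if_pos (by decide)]
        exact hR
      have := pvAbsorb_of_ws (m ++ ['\n', '\n']) p hmw
      simpa using this.symm
  · -- non-empty body
    have hSt : pvStateOf m = ⟨some (PySem.Chars.lstrip (pvLastLine (PySem.Chars.rstrip m))),
        (pvLines (PySem.Chars.rstrip m)).dropLast.foldl pvScanF none⟩ := by
      rw [pvStateOf, if_neg hR]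
    rw [pvStepB, hSt]
    simp only []
    rw [pvStepA]
    rw [if_neg hR]
    simp only []
    rw [← pvEnds_eq m hR]
    generalize hG : ((match
        (if (PySem.Chars.lstrip (pvLastLine (PySem.Chars.rstrip m)) ≠ [] ∧
            PySem.Chars.startswith (PySem.Chars.lstrip (pvLastLine (PySem.Chars.rstrip m))) pvImg = false)
            ∨ (pvLines (PySem.Chars.rstrip m)).dropLast.foldl pvScanF none = none
          then (PySem.Chars.lstrip (pvLastLine (PySem.Chars.rstrip m))).getLast?
          else (pvLines (PySem.Chars.rstrip m)).dropLast.foldl pvScanF none) with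
      | none => true
      | some c => !pvEnders.contains c) &&
      (!(PySem.Chars.lstrip p).isEmpty &&
        ((match (PySem.Chars.lstrip p).head? with
            | none => false
            | some c => pvIslower c || c == '(') ||
            PySem.Chars.startswith (PySem.Chars.lstrip p) "and ".toList ||
          PySem.Chars.startswith (PySem.Chars.lstrip p) "or ".toList ||
          PySem.Chars.startswith (PySem.Chars.lstrip p) "but ".toList))) = cnd
    cases cnd with
    | false =>
      simp only [Bool.false_eq_true, if_false]
      refine ⟨by simp [hfl], ?_⟩
      rw [← hSt]
      exact (pvAbsorb_of_nonws m p hR).symm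
    | true =>
      simp only [if_true]
      -- the merge branch
      have hnsne : PySem.Chars.lstrip p ≠ [] := by
        rcases Bool.and_eq_true .. |>.mp hG with ⟨_, hst⟩
        rcases Bool.and_eq_true .. |>.mp hst with ⟨hne, _⟩
        simpa [List.isEmpty_iff] using hne
      have hq : PySem.Chars.rstrip (PySem.Chars.lstrip p) ≠ [] := by
        intro hq0
        have hall := (pvRstrip_eq_nil_iff _).mp hq0
        cases hh : (PySem.Chars.lstrip p).head? with
        | none => exact hnsne (List.head?_eq_none_iff.mp hh)
        | some d =>
          have hd := List.head?_dropWhile_not (p := PySem.Chars.isspace) (l := p)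
          rw [show List.dropWhile PySem.Chars.isspace p = PySem.Chars.lstrip p from rfl, hh] at hd
          have := hall d (List.mem_of_mem_head? hh)
          simp [this] at hd
      refine ⟨by simp [pvRstripTail_flatten, hfl], ?_⟩
      have hR' : PySem.Chars.rstrip (PySem.Chars.rstrip m ++ ' ' :: PySem.Chars.lstrip p)
          = PySem.Chars.rstrip m ++ ' ' :: PySem.Chars.rstrip (PySem.Chars.lstrip p) := by
        have hsp : PySem.Chars.rstrip m ++ ' ' :: PySem.Chars.lstrip p
            = (PySem.Chars.rstrip m ++ [' ']) ++ PySem.Chars.lstrip p := by simp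
        rw [hsp, pvRstrip_append, if_neg hq]
        simp
      rw [pvStateOf, hR',
        if_neg (show ¬ (PySem.Chars.rstrip m ++ ' ' :: PySem.Chars.rstrip (PySem.Chars.lstrip p)
          = []) by simp)]
      -- shared facts about the old last line
      cases hc : (PySem.Chars.rstrip m).getLast? with
      | none => exact absurd (List.getLast?_eq_none_iff.mp hc) hR
      | some c =>
        have hcw : PySem.Chars.isspace c = false := pvRstrip_getLast_not_ws m c hc
        have hcn : c ≠ '\n' := by
          intro h; subst h
          simp [show PySem.Chars.isspace '\n' = true from by decide] at hcw
        have hll := pvLastLine_getLast (PySem.Chars.rstrip m) c hc hcn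
        obtain ⟨hstr, hlsne, hlast⟩ :=
          pvEndNonWs_strip (pvLastLine (PySem.Chars.rstrip m)) c hll hcw
        have hnnq := pvLines_ne_nil (PySem.Chars.rstrip (PySem.Chars.lstrip p))
        cases hql : pvLines (PySem.Chars.rstrip (PySem.Chars.lstrip p)) with
        | nil => exact absurd hql hnnq
        | cons q1 qr =>
          simp only [pvSplitOn_newline, hql]
          have hlm : pvLines (PySem.Chars.rstrip m ++ ' ' :: PySem.Chars.rstrip (PySem.Chars.lstrip p))
              = (pvLines (PySem.Chars.rstrip m)).dropLast
                ++ (pvLastLine (PySem.Chars.rstrip m) ++ ' ' :: q1) :: qr := by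
            rw [pvLines_append]
            have h2 : pvLines (' ' :: PySem.Chars.rstrip (PySem.Chars.lstrip p))
                = (' ' :: q1) :: qr := by
              simp only [pvLines, if_neg (by decide : ¬ (' ' = '\n')), hql]
            rw [h2]
            rfl
          -- the extended last line, stripped, is the same whether built from the old last
          -- line or from the stored (lstripped) tail
          have hdecomp : pvLastLine (PySem.Chars.rstrip m)
              = (pvLastLine (PySem.Chars.rstrip m)).takeWhile PySem.Chars.isspace
                ++ PySem.Chars.lstrip (pvLastLine (PySem.Chars.rstrip m)) :=
            (List.takeWhile_append_dropWhile ..).symm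
          have hCstrip : ∀ x : List Char,
              PySem.Chars.strip (pvLastLine (PySem.Chars.rstrip m) ++ x)
                = PySem.Chars.strip (PySem.Chars.lstrip (pvLastLine (PySem.Chars.rstrip m)) ++ x) := by
            intro x
            conv_lhs => rw [hdecomp]
            rw [List.append_assoc]
            exact pvStrip_ws_left _ _ (fun c hc => List.mem_takeWhile_imp hc)
          have hCls : PySem.Chars.lstrip (pvLastLine (PySem.Chars.rstrip m) ++ ' ' :: q1)
              = PySem.Chars.lstrip (pvLastLine (PySem.Chars.rstrip m)) ++ ' ' :: q1 := by
            rw [pvLstrip_append, if_neg hlsne]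
          have hClsB : PySem.Chars.lstrip
                (PySem.Chars.lstrip (pvLastLine (PySem.Chars.rstrip m)) ++ ' ' :: q1)
              = PySem.Chars.lstrip (pvLastLine (PySem.Chars.rstrip m)) ++ ' ' :: q1 := by
            rw [pvLstrip_append, pvLstrip_idem, if_neg hlsne]
          cases hqr : qr with
          | nil =>
            subst hqr
            simp only [PvSt.mk.injEq, Option.some.injEq, List.headD_cons, List.drop_succ_cons,
              List.drop_zero, List.getLastD_cons, List.getLastD_nil, List.dropLast_singleton,
              List.foldl_nil]
            have hLL : pvLastLine (PySem.Chars.rstrip m ++ ' ' :: PySem.Chars.rstrip (PySem.Chars.lstrip p))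
                = pvLastLine (PySem.Chars.rstrip m) ++ ' ' :: q1 := by
              rw [pvLastLine, hlm, pvGetLastD_append _ _ _ (by simp)]
              simp
            refine ⟨?_, ?_⟩
            · -- tail
              rw [hClsB, hLL, hCls]
            · -- bodyChar
              rw [hlm, List.dropLast_concat]
          | cons a b =>
            subst hqr
            simp only [PvSt.mk.injEq, Option.some.injEq, List.headD_cons, List.drop_succ_cons,
              List.drop_zero]
            have hLL : pvLastLine (PySem.Chars.rstrip m ++ ' ' :: PySem.Chars.rstrip (PySem.Chars.lstrip p))
                = (a :: b).getLastD [] := by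
              rw [pvLastLine, hlm, pvGetLastD_append _ _ _ (by simp),
                show (pvLastLine (PySem.Chars.rstrip m) ++ ' ' :: q1) :: a :: b
                  = [pvLastLine (PySem.Chars.rstrip m) ++ ' ' :: q1] ++ a :: b from rfl,
                pvGetLastD_append _ _ _ (by simp)]
            refine ⟨?_, ?_⟩
            · -- tail
              rw [hLL,
                show (PySem.Chars.lstrip (pvLastLine (PySem.Chars.rstrip m)) ++ ' ' :: q1) :: a :: b
                  = [PySem.Chars.lstrip (pvLastLine (PySem.Chars.rstrip m)) ++ ' ' :: q1] ++ a :: b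
                  from rfl,
                pvGetLastD_append _ _ _ (by simp)]
            · -- bodyChar
              rw [hlm, List.dropLast_append_cons,
                List.dropLast_cons_of_ne_nil (by simp : (a :: b : List (List Char)) ≠ []),
                List.foldl_append, List.foldl_cons,
                List.dropLast_cons_of_ne_nil (by simp : (a :: b : List (List Char)) ≠ []),
                List.foldl_cons]
              congr 1
              exact (pvScanF_congr _ _ _ (hCstrip (' ' :: q1)).symm)

theorem pvFold_eq (rest : List (List Char)) (m : List Char) (pieces : List (List Char))
    (hfl : pieces.flatten = m) :
    (rest.foldl pvStepB (pieces, pvStateOf m)).1.flatten = rest.foldl pvStepA m ∧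
      (rest.foldl pvStepB (pieces, pvStateOf m)).2 = pvStateOf (rest.foldl pvStepA m) := by
  induction rest generalizing m pieces with
  | nil => exact ⟨hfl, rfl⟩
  | cons p rest ih =>
    obtain ⟨h1, h2⟩ := pvStep_eq m p pieces hfl
    simp only [List.foldl_cons]
    have : pvStepB (pieces, pvStateOf m) p =
        ((pvStepB (pieces, pvStateOf m) p).1, pvStateOf (pvStepA m p)) := by
      rw [← h2]
    rw [this]
    exact ih (pvStepA m p) _ h1

-- ===== VERDICT (by name: the statement is the Claim_ definition above) =====
theorem merge_chunk_boundaries_py_spec : Claim_equal_merge_chunk_boundaries_py := by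
  intro parts _hdom
  show merge_chunk_boundaries_py parts = merge_chunk_boundaries_py_alt parts
  cases parts with
  | nil => rfl
  | cons p0 rest =>
    simp only [merge_chunk_boundaries_py, merge_chunk_boundaries_py_alt]
    have h0 : pvAbsorb pvInitSt p0.toList = pvStateOf p0.toList := by
      have h := pvAbsorb_of_ws [] p0.toList (by decide)
      simpa using h.symm
    rw [h0]
    obtain ⟨h1, h2⟩ := pvFold_eq (rest.map String.toList) p0.toList [p0.toList] (by simp)
    rw [← h1]
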